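-- pv_equiv track=rewrite | github.com/blewett/TensorFlow-Ubuntu-for-older-Intel-CPUs-without-AVX | section-shell.py | find_section_info
-- ===== SOURCE A (Python) =====
-- section_tag = "# section "
--
-- section_tag_len = 10
--
-- def find_section_info(content):
--     sections = []
--     max = 0
--     index = 0
--     for line in content:
--         where = line.find(section_tag)
--         if where == 0:
--             line = line[section_tag_len:].strip()
--             where = line.find(":")
--             section = line[:where].strip()
--             sections.append([section,index])
--             length = len(section)
--             if length > max:
--                 max = length
--         index += 1
--     return max, sections
-- ===== SOURCE B (Python) =====
-- section_tag = "# section "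
--
-- section_tag_len = 10
--
--
-- def find_section_info(content):
--     # Divide and conquer: split the index range in half, solve each half, and
--     # merge by taking the larger max and concatenating the section lists
--     # (correct because max and list concatenation are associative).
--     def go(lo, hi):
--         if hi - lo == 0:
--             return 0, []
--         if hi - lo == 1:
--             line = content[lo]
--             if line.find(section_tag) == 0:
--                 body = line[section_tag_len:].strip()
--                 section = body[:body.find(":")].strip()
--                 return len(section), [[section, lo]]
--             return 0, []
--         mid = (lo + hi) // 2
--         m1, s1 = go(lo, mid)
--         m2, s2 = go(mid, hi)
--         return (m1 if m1 > m2 else m2), s1 + s2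
--     return go(0, len(content))
-- ===== Notes on version B (the rewrite author's own statement) =====
-- stated objective: alternative
-- what changed: Replaces A's forward single-pass accumulator loop (running max, manual index counter) by a divide-and-conquer recursion: the index range is split in half, each half solved recursively, and the results merged by taking the larger max and concatenating the section lists, which is correct because max and concatenation are associative.
import Mathlib
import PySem

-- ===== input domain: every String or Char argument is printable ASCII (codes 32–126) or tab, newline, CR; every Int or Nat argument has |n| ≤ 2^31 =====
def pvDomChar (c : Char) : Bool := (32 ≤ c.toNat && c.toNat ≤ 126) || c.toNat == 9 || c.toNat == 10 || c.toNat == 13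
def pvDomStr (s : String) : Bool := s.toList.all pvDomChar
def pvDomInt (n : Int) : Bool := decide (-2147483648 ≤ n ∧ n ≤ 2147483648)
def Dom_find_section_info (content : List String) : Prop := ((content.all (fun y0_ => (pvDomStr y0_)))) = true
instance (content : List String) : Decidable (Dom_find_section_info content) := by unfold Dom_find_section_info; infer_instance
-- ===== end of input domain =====

-- B replaces A's forward accumulator loop by a divide-and-conquer recursion: split the
-- index range in half, solve each half, merge by max and list concatenation (objective: alternative).

-- ===== PORT A =====
def sectionTag : String := "# section "

def sectionTagLen : Int := 10

-- the body of A's for-loop, state = (sections, max, index)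
def loopA (st : (List (String × Int)) × Int × Int) (line : String) : (List (String × Int)) × Int × Int :=
  let w := PySem.Str.find line sectionTag
  if w = 0 then
    let line2 := PySem.Str.strip (PySem.Str.slice line (some sectionTagLen) none)
    let w2 := PySem.Str.find line2 ":"
    let sect := PySem.Str.strip (PySem.Str.slice line2 none (some w2))
    let len := PySem.Str.len sect
    (st.1 ++ [(sect, st.2.2)], if len > st.2.1 then len else st.2.1, st.2.2 + 1)
  else (st.1, st.2.1, st.2.2 + 1)

def find_section_info (content : List String) : Int × (List (String × Int)) :=
  let r := content.foldl loopA ([], 0, 0)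
  (r.2.1, r.1)

-- ===== PORT B =====
-- Source B's inner 'go(lo, hi)': divide and conquer over the index range [lo, hi)
-- (lo, hi are Nat here: Source B only ever calls go with 0 <= lo <= hi <= len(content);
--  content[lo] is in range whenever the branch reading it is taken, ported as getD)
def goB (content : List String) : Nat → Nat → Nat → Int × List (String × Int)
  | 0, _, _ => (0, [])          -- fuel exhausted: never reached (fuel starts at hi - lo and halving keeps hi - lo ≤ fuel)
  | fuel + 1, lo, hi =>
    if hi - lo = 0 then (0, [])
    else if hi - lo = 1 then
      let line := content.getD lo ""
      if PySem.Str.find line sectionTag = 0 then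
        let body := PySem.Str.strip (PySem.Str.slice line (some sectionTagLen) none)
        let sect := PySem.Str.strip (PySem.Str.slice body none (some (PySem.Str.find body ":")))
        (PySem.Str.len sect, [(sect, (lo : Int))])
      else (0, [])
    else
      let mid := (lo + hi) / 2
      let r1 := goB content fuel lo mid
      let r2 := goB content fuel mid hi
      ((if r1.1 > r2.1 then r1.1 else r2.1), r1.2 ++ r2.2)

def find_section_info_alt (content : List String) : Int × (List (String × Int)) :=
  goB content content.length 0 content.length

-- ===== PRECONDITION & SPEC =====
def Spec_find_section_info (content : List String) (out : Int × (List (String × Int))) : Prop := out = find_section_info_alt content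
instance (content : List String) (out : Int × (List (String × Int))) : Decidable (Spec_find_section_info content out) := by unfold Spec_find_section_info; infer_instance

-- ===== CLAIM (what is proved, stated in full; the proofs are below) =====
def Claim_equal_find_section_info : Prop := ∀ (content : List String), Dom_find_section_info content → Spec_find_section_info content (find_section_info content)

-- ===== LEMMAS AND PROOFS =====

-- the section name both programs extract from a matching line
def sectName (line : String) : String :=
  let body := PySem.Str.strip (PySem.Str.slice line (some sectionTagLen) none)
  PySem.Str.strip (PySem.Str.slice body none (some (PySem.Str.find body ":")))

-- the (name, index) pairs collected from lines L when enumeration starts at k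
def collect (L : List String) (k : Int) : List (String × Int) :=
  (PySem.List.enumerate L k).filterMap
    (fun p => if PySem.Str.find p.2 sectionTag = 0 then some (sectName p.2, p.1) else none)

-- the max of the name lengths (0 for the empty list)
def segM (L : List (String × Int)) : Int :=
  L.foldr (fun p m => max m (PySem.Str.len p.1)) 0

-- A's fold from an arbitrary state: appends the collection, folds its lengths into the max
theorem foldA_eq (content : List String) :
    ∀ (acc : List (String × Int)) (mx k : Int),
      content.foldl loopA (acc, mx, k) =
        (acc ++ collect content k,
         (collect content k).foldl
           (fun m p => if PySem.Str.len p.1 > m then PySem.Str.len p.1 else m) mx,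
         k + content.length) := by
  induction content with
  | nil => intro acc mx k; simp [collect, PySem.List.enumerate_nil]
  | cons x xs ih =>
    intro acc mx k
    by_cases hf : PySem.Str.find x sectionTag = 0
    · simp only [collect, PySem.List.enumerate_cons, List.filterMap_cons, hf, if_pos,
        List.foldl_cons, loopA]
      rw [ih]
      simp only [collect, sectName, List.append_assoc, List.singleton_append,
        List.length_cons, Prod.mk.injEq]
      refine ⟨by trivial, by trivial, by push_cast; ring⟩
    · simp only [collect, PySem.List.enumerate_cons, List.filterMap_cons, hf,
        List.foldl_cons, loopA, if_false]
      rw [ih]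
      simp only [collect, List.length_cons, Prod.mk.injEq]
      refine ⟨by trivial, by trivial, by push_cast; ring⟩

-- both programs' running-max step is 'max'
theorem step_eq_max (m a : Int) : (if a > m then a else m) = max m a := by
  rw [max_def]; split_ifs <;> omega

theorem foldr_seed (L : List (String × Int)) :
    ∀ (a x : Int),
      L.foldr (fun p m => max m (PySem.Str.len p.1)) (max a x) =
        max (L.foldr (fun p m => max m (PySem.Str.len p.1)) a) x := by
  induction L with
  | nil => intro a x; rfl
  | cons p t ih =>
    intro a x
    simp only [List.foldr_cons, ih, max_right_comm]

-- A's left fold of the max equals the right fold segM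
theorem foldl_step_eq_segM (L : List (String × Int)) :
    ∀ (a : Int),
      L.foldl (fun m p => if PySem.Str.len p.1 > m then PySem.Str.len p.1 else m) a =
        L.foldr (fun p m => max m (PySem.Str.len p.1)) a := by
  induction L with
  | nil => intro a; rfl
  | cons p t ih =>
    intro a
    rw [List.foldl_cons, List.foldr_cons, step_eq_max, ih, foldr_seed]

theorem segM_nonneg (L : List (String × Int)) : 0 ≤ segM L := by
  induction L with
  | nil => exact le_refl 0
  | cons p t ih => exact le_trans ih (le_max_left _ _)

theorem foldr_of_nonneg_seed (L : List (String × Int)) :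
    ∀ (b : Int), 0 ≤ b →
      L.foldr (fun p m => max m (PySem.Str.len p.1)) b = max (segM L) b := by
  induction L with
  | nil => intro b hb; exact (max_eq_right hb).symm
  | cons p t ih =>
    intro b hb
    rw [List.foldr_cons, ih b hb]
    show max (max (segM t) b) (PySem.Str.len p.1) = max (segM (p :: t)) b
    rw [show segM (p :: t) = max (segM t) (PySem.Str.len p.1) from rfl, max_right_comm]

theorem segM_append (s1 s2 : List (String × Int)) :
    segM (s1 ++ s2) = max (segM s1) (segM s2) := by
  rw [segM, List.foldr_append]
  exact foldr_of_nonneg_seed s1 (segM s2) (segM_nonneg s2)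

theorem collect_append (L1 L2 : List String) (k : Int) :
    collect (L1 ++ L2) k = collect L1 k ++ collect L2 (k + L1.length) := by
  simp [collect, PySem.List.enumerate_append, List.filterMap_append]

-- characterisation of B's divide-and-conquer on any well-formed range
theorem goB_eq (content : List String) :
    ∀ (fuel lo hi : Nat), hi - lo ≤ fuel → lo ≤ hi → hi ≤ content.length →
      goB content fuel lo hi =
        (segM (collect ((content.drop lo).take (hi - lo)) lo),
         collect ((content.drop lo).take (hi - lo)) lo) := by
  intro fuel
  induction fuel with
  | zero =>
    intro lo hi hd hlh hhn
    rw [show hi - lo = 0 by omega]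
    simp [goB, collect, segM, PySem.List.enumerate_nil]
  | succ fuel ih =>
    intro lo hi hd hlh hhn
    by_cases h0 : hi - lo = 0
    · rw [goB, if_pos h0, h0]
      simp [collect, segM, PySem.List.enumerate_nil]
    · by_cases h1 : hi - lo = 1
      · have hlt : lo < content.length := by omega
        have hdrop : content.drop lo = content[lo] :: content.drop (lo + 1) :=
          List.drop_eq_getElem_cons hlt
        have hget : content.getD lo "" = content[lo] := List.getD_eq_getElem content "" hlt
        have hseg : (content.drop lo).take (hi - lo) = [content[lo]] := by
          rw [h1, hdrop, List.take_succ_cons, List.take_zero]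
        by_cases hf : PySem.Str.find content[lo] sectionTag = 0
        · have hc : collect ((content.drop lo).take (hi - lo)) lo =
              [(sectName content[lo], (lo : Int))] := by
            rw [hseg, collect, PySem.List.enumerate_cons, PySem.List.enumerate_nil,
              List.filterMap_cons, List.filterMap_nil, if_pos hf]
          rw [goB, if_neg h0, if_pos h1, hc]
          show (if PySem.Str.find (content.getD lo "") sectionTag = 0 then _ else _) = _
          rw [hget, if_pos hf]
          have hm : segM [(sectName content[lo], (lo : Int))] =
              PySem.Str.len (sectName content[lo]) := by
            rw [show segM [(sectName content[lo], (lo : Int))] =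
                max 0 (PySem.Str.len (sectName content[lo])) from rfl]
            refine max_eq_right ?_
            generalize sectName content[lo] = u
            rw [PySem.Str.len_eq]
            exact Int.natCast_nonneg _
          rw [hm]
          rfl
        · have hc : collect ((content.drop lo).take (hi - lo)) lo = [] := by
            rw [hseg, collect, PySem.List.enumerate_cons, PySem.List.enumerate_nil,
              List.filterMap_cons, List.filterMap_nil, if_neg hf]
          rw [goB, if_neg h0, if_pos h1, hc]
          show (if PySem.Str.find (content.getD lo "") sectionTag = 0 then _ else _) = _
          rw [hget, if_neg hf]
          rfl
      · -- hi - lo ≥ 2: split at mid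
        have h2 : 2 ≤ hi - lo := by omega
        rw [goB, if_neg h0, if_neg h1]
        have hmid1 : lo < (lo + hi) / 2 := by omega
        have hmid2 : (lo + hi) / 2 < hi := by omega
        show ((if (goB content fuel lo ((lo + hi) / 2)).1 > (goB content fuel ((lo + hi) / 2) hi).1
                then (goB content fuel lo ((lo + hi) / 2)).1
                else (goB content fuel ((lo + hi) / 2) hi).1),
              (goB content fuel lo ((lo + hi) / 2)).2 ++ (goB content fuel ((lo + hi) / 2) hi).2) = _
        rw [ih lo ((lo + hi) / 2) (by omega) (by omega) (by omega),
            ih ((lo + hi) / 2) hi (by omega) (by omega) hhn]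
        have hsplit : (content.drop lo).take (hi - lo) =
            (content.drop lo).take ((lo + hi) / 2 - lo) ++
              (content.drop ((lo + hi) / 2)).take (hi - (lo + hi) / 2) := by
          rw [show hi - lo = ((lo + hi) / 2 - lo) + (hi - (lo + hi) / 2) by omega,
              List.take_add, List.drop_drop,
              show lo + ((lo + hi) / 2 - lo) = (lo + hi) / 2 by omega]
        have hlen : ((content.drop lo).take ((lo + hi) / 2 - lo)).length =
            (lo + hi) / 2 - lo := by
          rw [List.length_take, List.length_drop]
          omega
        rw [hsplit, collect_append, hlen, segM_append,
            show (lo : Int) + (((lo + hi) / 2 - lo : Nat) : Int) = (((lo + hi) / 2 : Nat) : Int) by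
              push_cast; omega]
        simp only [Prod.mk.injEq]
        constructor
        · rw [max_def]; split_ifs <;> omega
        · trivial

-- ===== VERDICT (by name: the statement is the Claim_ definition above) =====
theorem find_section_info_spec : Claim_equal_find_section_info := by
  intro content _
  unfold Spec_find_section_info find_section_info find_section_info_alt
  rw [foldA_eq content [] 0 0,
      goB_eq content content.length 0 content.length (by omega) (Nat.zero_le _) (le_refl _)]
  simp only [List.drop_zero, Nat.sub_zero, List.take_length, List.nil_append, Nat.cast_zero]
  rw [foldl_step_eq_segM]
  rfl
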